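-- pv_equiv track=rewrite | github.com/redsymbol/mobilize | mobilize/httputil.py | is_absolute_url
-- ===== SOURCE A (Python) =====
-- def is_absolute_url(url):
--     protocols = {
--         'http',
--         'https',
--         'ftp',
--         }
--     is_abs = False
--     for protocol in protocols:
--         if url.startswith(protocol + '://'):
--             is_abs = True
--             break
--     return is_abs
-- ===== SOURCE B (Python) =====
-- def is_absolute_url(url):
--     i = url.find('://')
--     return i != -1 and url[:i] in {'http', 'https', 'ftp'}
-- ===== Notes on version B (the rewrite author's own statement) =====
-- stated objective: idiomatic
-- what changed: Replaces the try-each-prefix startswith loop by a single parse: locate the first '://' with str.find and test the text before it for membership in the protocol set.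
import Mathlib
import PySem

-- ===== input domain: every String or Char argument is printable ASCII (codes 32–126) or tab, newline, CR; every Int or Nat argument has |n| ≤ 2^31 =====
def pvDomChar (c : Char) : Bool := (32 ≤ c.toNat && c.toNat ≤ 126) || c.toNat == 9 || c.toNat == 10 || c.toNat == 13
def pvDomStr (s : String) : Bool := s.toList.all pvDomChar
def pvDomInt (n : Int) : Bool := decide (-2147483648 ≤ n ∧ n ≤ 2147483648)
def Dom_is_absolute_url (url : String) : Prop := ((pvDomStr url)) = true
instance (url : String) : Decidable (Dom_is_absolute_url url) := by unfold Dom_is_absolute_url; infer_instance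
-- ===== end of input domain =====

-- B replaces A's try-each-prefix startswith loop by one parse: find the first '://', then one set lookup of the scheme (idiomatic; same cost).

-- ===== PORT A =====
-- the for-loop over the protocol set, with its early break
def pvProtoLoop (url : String) : List String → Bool
  | [] => false
  | p :: rest => if PySem.Str.startswith url (p ++ "://") then true else pvProtoLoop url rest

def is_absolute_url (url : String) : Bool :=
  pvProtoLoop url (PySem.Set.ofList ["http", "https", "ftp"])

-- ===== PORT B =====
def is_absolute_url_alt (url : String) : Bool :=
  let i := PySem.Str.find url "://"
  i != -1 && decide (PySem.Str.slice url none (some i) ∈ PySem.Set.ofList ["http", "https", "ftp"])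

-- ===== PRECONDITION & SPEC =====
def Spec_is_absolute_url (url : String) (out : Bool) : Prop := out = is_absolute_url_alt url
instance (url : String) (out : Bool) : Decidable (Spec_is_absolute_url url out) := by unfold Spec_is_absolute_url; infer_instance

-- ===== CLAIM (what is proved, stated in full; the proofs are below) =====
def Claim_equal_is_absolute_url : Prop := ∀ (url : String), Dom_is_absolute_url url → Spec_is_absolute_url url (is_absolute_url url)

-- ===== LEMMAS AND PROOFS =====

-- if url starts with p ++ '://' and p has no colon, the first '://' is exactly at index |p|
lemma find_of_startswith (cs p : List Char) (hp : ':' ∉ p)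
    (h : (p ++ [':', '/', '/']) <+: cs) :
    PySem.Chars.find cs [':', '/', '/'] = (p.length : Int) ∧ cs.take p.length = p := by
  obtain ⟨t, ht⟩ := h
  have hinf : [':', '/', '/'] <:+: cs := ⟨p, t, by simpa using ht⟩
  have hnn : 0 ≤ PySem.Chars.find cs [':', '/', '/'] :=
    (PySem.Chars.find_nonneg_iff cs _).mpr hinf
  obtain ⟨hpre, hmin⟩ := PySem.Chars.find_spec hnn
  set m := (PySem.Chars.find cs [':', '/', '/']).toNat with hm
  have hdropP : [':', '/', '/'] <+: cs.drop p.length := by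
    refine ⟨t, ?_⟩
    rw [← ht]; simp
  have hme : m = p.length := by
    rcases Nat.lt_trichotomy m p.length with hlt | heq | hgt
    · exfalso
      obtain ⟨r, hr⟩ := hpre
      have hd : cs.drop m = p.drop m ++ ([':', '/', '/'] ++ t) := by
        rw [← ht, List.drop_append_of_le_length (by simp; omega),
          List.drop_append_of_le_length (by omega)]
        simp
      have hne : p.drop m ≠ [] := by
        simp [List.drop_eq_nil_iff]; omega
      cases hq : p.drop m with
      | nil => exact hne hq
      | cons a q' =>
        have : a = ':' := by
          rw [hd, hq] at hr
          simpa using congrArg (fun l => l.head?) hr.symm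
        exact hp (this ▸ (List.mem_of_mem_drop (hq ▸ List.mem_cons_self)))
    · exact heq
    · exact absurd hdropP (hmin p.length hgt)
  constructor
  · rw [← Int.toNat_of_nonneg hnn]
    exact_mod_cast hme
  · rw [← ht]; simp

-- conversely, whatever precedes the first '://' is a prefix that '://' follows
lemma startswith_of_find (cs : List Char) (n : Nat)
    (hf : PySem.Chars.find cs [':', '/', '/'] = (n : Int)) :
    (cs.take n ++ [':', '/', '/']) <+: cs := by
  have hnn : 0 ≤ PySem.Chars.find cs [':', '/', '/'] := by rw [hf]; positivity
  obtain ⟨hpre, -⟩ := PySem.Chars.find_spec hnn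
  rw [hf] at hpre
  simp at hpre
  obtain ⟨r, hr⟩ := hpre
  refine ⟨r, ?_⟩
  conv_rhs => rw [← List.take_append_drop n cs]
  rw [List.append_assoc, hr]

-- A's loop returns true exactly when url starts with one of the three absolute prefixes
lemma a_true_iff (url : String) :
    is_absolute_url url = true ↔
      ("http".toList ++ [':', '/', '/']) <+: url.toList ∨
      ("https".toList ++ [':', '/', '/']) <+: url.toList ∨
      ("ftp".toList ++ [':', '/', '/']) <+: url.toList := by
  have hset : PySem.Set.ofList ["http", "https", "ftp"] = ["http", "https", "ftp"] := rfl
  simp only [is_absolute_url, hset, pvProtoLoop, PySem.Str.startswith_eq]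
  split_ifs with h1 h2 h3 <;>
    simp_all [PySem.Chars.startswith_iff]

-- B returns true exactly when '://' occurs and the text before its first occurrence is a protocol
lemma b_true_iff (url : String) :
    is_absolute_url_alt url = true ↔
      PySem.Chars.find url.toList [':', '/', '/'] ≠ -1 ∧
      (url.toList.take (PySem.Chars.find url.toList [':', '/', '/']).toNat = "http".toList ∨
       url.toList.take (PySem.Chars.find url.toList [':', '/', '/']).toNat = "https".toList ∨
       url.toList.take (PySem.Chars.find url.toList [':', '/', '/']).toNat = "ftp".toList) := by
  have hset : PySem.Set.ofList ["http", "https", "ftp"] = ["http", "https", "ftp"] := rfl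
  have hfind : PySem.Str.find url "://" = PySem.Chars.find url.toList [':', '/', '/'] := by
    rw [PySem.Str.find_eq]
    simp only [show "://".toList = [':', '/', '/'] from rfl]
  simp only [is_absolute_url_alt, hset, hfind, Bool.and_eq_true, bne_iff_ne, ne_eq,
    decide_eq_true_eq, List.mem_cons, List.not_mem_nil, or_false]
  constructor
  · rintro ⟨hne, hmem⟩
    have hnn : 0 ≤ PySem.Chars.find url.toList [':', '/', '/'] := by
      have := PySem.Chars.neg_one_le_find url.toList [':', '/', '/']
      omega
    have hsl : (PySem.Str.slice url none (some (PySem.Chars.find url.toList [':', '/', '/']))).toList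
        = url.toList.take (PySem.Chars.find url.toList [':', '/', '/']).toNat := by
      rw [PySem.Str.toList_slice, PySem.Chars.slice_eq_listSlice, PySem.List.slice_to _ hnn]
    refine ⟨hne, ?_⟩
    rcases hmem with h | h | h
    · exact Or.inl (by rw [← hsl, h])
    · exact Or.inr (Or.inl (by rw [← hsl, h]))
    · exact Or.inr (Or.inr (by rw [← hsl, h]))
  · rintro ⟨hne, hmem⟩
    have hnn : 0 ≤ PySem.Chars.find url.toList [':', '/', '/'] := by
      have := PySem.Chars.neg_one_le_find url.toList [':', '/', '/']
      omega
    have hsl : (PySem.Str.slice url none (some (PySem.Chars.find url.toList [':', '/', '/']))).toList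
        = url.toList.take (PySem.Chars.find url.toList [':', '/', '/']).toNat := by
      rw [PySem.Str.toList_slice, PySem.Chars.slice_eq_listSlice, PySem.List.slice_to _ hnn]
    refine ⟨hne, ?_⟩
    rcases hmem with h | h | h
    · exact Or.inl (by rw [← String.toList_inj, hsl, h])
    · exact Or.inr (Or.inl (by rw [← String.toList_inj, hsl, h]))
    · exact Or.inr (Or.inr (by rw [← String.toList_inj, hsl, h]))

-- ===== VERDICT (by name: the statement is the Claim_ definition above) =====
theorem is_absolute_url_spec : Claim_equal_is_absolute_url := by
  intro url _
  unfold Spec_is_absolute_url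
  have key : is_absolute_url url = true ↔ is_absolute_url_alt url = true := by
    rw [a_true_iff, b_true_iff]
    constructor
    · rintro (h | h | h)
      · obtain ⟨hf, -⟩ := find_of_startswith url.toList "http".toList (by decide) h
        refine ⟨by rw [hf]; decide, Or.inl ?_⟩
        rw [hf]
        simpa using (find_of_startswith url.toList "http".toList (by decide) h).2
      · obtain ⟨hf, -⟩ := find_of_startswith url.toList "https".toList (by decide) h
        refine ⟨by rw [hf]; decide, Or.inr (Or.inl ?_)⟩
        rw [hf]
        simpa using (find_of_startswith url.toList "https".toList (by decide) h).2
      · obtain ⟨hf, -⟩ := find_of_startswith url.toList "ftp".toList (by decide) h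
        refine ⟨by rw [hf]; decide, Or.inr (Or.inr ?_)⟩
        rw [hf]
        simpa using (find_of_startswith url.toList "ftp".toList (by decide) h).2
    · rintro ⟨hne, hmem⟩
      have hnn : 0 ≤ PySem.Chars.find url.toList [':', '/', '/'] := by
        have := PySem.Chars.neg_one_le_find url.toList [':', '/', '/']
        omega
      have hf : PySem.Chars.find url.toList [':', '/', '/']
          = ((PySem.Chars.find url.toList [':', '/', '/']).toNat : Int) :=
        (Int.toNat_of_nonneg hnn).symm
      have hsw := startswith_of_find url.toList _ hf
      rcases hmem with h | h | h
      · exact Or.inl (h ▸ hsw)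
      · exact Or.inr (Or.inl (h ▸ hsw))
      · exact Or.inr (Or.inr (h ▸ hsw))
  exact Bool.eq_iff_iff.mpr key
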